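-- pv_equiv track=rewrite | github.com/Marina-Banov/STEM-Games | 2019/all_the_boxes.py | row_start_odd
-- ===== SOURCE A (Python) =====
-- def row_start_odd(n):
--     meta_step = 7
--     arr = [1, 2, 4]
--     if n <= 3:
--         return arr[n-1], meta_step
--
--     prev = 4
--     step = 4
--     inc = True
--     for i in range(3, n):
--         if inc:
--             meta_step += 4
--         prev += step
--         inc = not inc
--         if inc:
--             step += 2
--
--     return prev, meta_step
-- ===== SOURCE B (Python) =====
-- def row_start_odd(n):
--     # Closed-form (piecewise on parity) instead of the O(n) loop.
--     if n <= 3: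
--         return [1, 2, 4][n - 1], 7
--     m, r = divmod(n - 3, 2)
--     if r == 0:
--         return 2 * m * m + 6 * m + 4, 7 + 4 * m
--     return 2 * m * m + 8 * m + 8, 7 + 4 * (m + 1)
-- ===== Notes on version B (the rewrite author's own statement) =====
-- stated objective: faster
-- what changed: Replaces the O(n) accumulation loop with a closed-form piecewise-on-parity arithmetic formula for both prev and meta_step.
import Mathlib
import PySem

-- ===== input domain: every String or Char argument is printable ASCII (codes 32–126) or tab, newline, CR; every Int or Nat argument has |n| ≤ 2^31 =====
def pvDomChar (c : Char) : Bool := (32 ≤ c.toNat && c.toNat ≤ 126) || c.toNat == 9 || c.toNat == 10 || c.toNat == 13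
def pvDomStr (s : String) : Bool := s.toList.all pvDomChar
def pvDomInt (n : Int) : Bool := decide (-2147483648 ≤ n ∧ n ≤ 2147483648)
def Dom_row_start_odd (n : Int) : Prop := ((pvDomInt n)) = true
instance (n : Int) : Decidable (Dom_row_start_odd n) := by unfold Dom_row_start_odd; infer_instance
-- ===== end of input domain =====

-- B replaces A's O(n) loop with a closed-form piecewise-on-parity formula (asymptotically faster).

-- ===== PORT A =====
-- loop body of A's for-loop; state = (prev, step, inc, meta_step)
def pvLoopA (st : Int × Int × Bool × Int) (_i : Int) : Int × Int × Bool × Int :=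
  let ms := if st.2.2.1 then st.2.2.2 + 4 else st.2.2.2
  let prev := st.1 + st.2.1
  let inc := !st.2.2.1
  let step := if inc then st.2.1 + 2 else st.2.1
  (prev, step, inc, ms)

def row_start_odd (n : Int) : Int × Int :=
  let meta_step : Int := 7
  let arr : List Int := [1, 2, 4]
  if n ≤ 3 then
    (PySem.List.pyGetD arr (n - 1) 0, meta_step)  -- arr[n-1]; Pre_ keeps the index in range
  else
    let s := (PySem.List.pyRange 3 n 1).foldl pvLoopA (4, 4, true, meta_step)
    (s.1, s.2.2.2)

-- ===== PORT B =====
def row_start_odd_alt (n : Int) : Int × Int :=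
  if n ≤ 3 then
    (PySem.List.pyGetD ([1, 2, 4] : List Int) (n - 1) 0, 7)
  else
    let m := PySem.Int.floordiv (n - 3) 2
    let r := PySem.Int.mod (n - 3) 2
    if r = 0 then (2 * m * m + 6 * m + 4, 7 + 4 * m)
    else (2 * m * m + 8 * m + 8, 7 + 4 * (m + 1))

-- ===== PRECONDITION & SPEC =====
-- Pre_ excludes n ≤ -3, where A's arr[n-1] raises IndexError (B raises there too).
def Pre_row_start_odd (n : Int) : Prop := -2 ≤ n
instance (n : Int) : Decidable (Pre_row_start_odd n) := by unfold Pre_row_start_odd; infer_instance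
def pvWitness_row_start_odd : Int := (5)

def Spec_row_start_odd (n : Int) (out : Int × Int) : Prop := out = row_start_odd_alt n
instance (n : Int) (out : Int × Int) : Decidable (Spec_row_start_odd n out) := by unfold Spec_row_start_odd; infer_instance

-- ===== CLAIM (what is proved, stated in full; the proofs are below) =====
def Claim_equal_row_start_odd : Prop := ∀ (n : Int), Dom_row_start_odd n → Pre_row_start_odd n → Spec_row_start_odd n (row_start_odd n)

-- ===== LEMMAS AND PROOFS =====
-- the state of A's loop after j iterations
def pvStateA : Nat → Int × Int × Bool × Int
  | 0 => (4, 4, true, 7)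
  | j + 1 => pvLoopA (pvStateA j) (3 + j)

lemma pvFold_eq (j : Nat) :
    (PySem.List.pyRange 3 (3 + (j : Int)) 1).foldl pvLoopA (4, 4, true, 7) = pvStateA j := by
  induction j with
  | zero => simp [PySem.List.pyRange_one_eq_nil, pvStateA]
  | succ j ih =>
      have h : (3 : Int) + ((j : Nat) + 1 : Nat) = (3 + (j : Int)) + 1 := by push_cast; ring
      rw [h, PySem.List.pyRange_one_succ_right (by omega), List.foldl_append, ih]
      simp [pvStateA]

lemma pvState_closed (m : Nat) :
    pvStateA (2 * m) = (2 * (m : Int) * m + 6 * m + 4, 4 + 2 * (m : Int), true, 7 + 4 * (m : Int)) ∧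
    pvStateA (2 * m + 1) = (2 * (m : Int) * m + 8 * m + 8, 4 + 2 * (m : Int), false, 7 + 4 * ((m : Int) + 1)) := by
  induction m with
  | zero => constructor <;> simp [pvStateA, pvLoopA]
  | succ m ih =>
      have h1 : 2 * (m + 1) = (2 * m + 1) + 1 := by omega
      have h2 : 2 * (m + 1) + 1 = ((2 * m + 1) + 1) + 1 := by omega
      constructor
      · rw [h1, pvStateA, ih.2]
        simp only [pvLoopA, Prod.ext_iff]
        push_cast
        refine ⟨?_, ?_, ?_, ?_⟩ <;> (try simp) <;> (try ring)
      · rw [h2, pvStateA, h1.symm, h1, pvStateA, ih.2]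
        simp only [pvLoopA, Prod.ext_iff]
        push_cast
        refine ⟨?_, ?_, ?_, ?_⟩ <;> (try simp) <;> (try ring)

-- ===== VERDICT (by name: the statement is the Claim_ definition above) =====
theorem row_start_odd_spec : Claim_equal_row_start_odd := by
  intro n _ hpre
  unfold Spec_row_start_odd row_start_odd row_start_odd_alt
  by_cases h : n ≤ 3
  · simp [h]
  · simp only [h, if_false]
    rw [not_le] at h
    obtain ⟨j, hj⟩ : ∃ j : Nat, n - 3 = (j : Int) := ⟨(n - 3).toNat, by omega⟩
    have hn : n = 3 + (j : Int) := by omega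
    rw [hn]
    have hfd : PySem.Int.floordiv ((3 + (j : Int)) - 3) 2 = ((j / 2 : Nat) : Int) := by
      have : (3 + (j : Int)) - 3 = (j : Int) := by ring
      rw [this]; exact_mod_cast PySem.Int.floordiv_natCast j 2
    have hmd : PySem.Int.mod ((3 + (j : Int)) - 3) 2 = ((j % 2 : Nat) : Int) := by
      have : (3 + (j : Int)) - 3 = (j : Int) := by ring
      rw [this]; exact_mod_cast PySem.Int.mod_natCast j 2
    rw [pvFold_eq j, hfd, hmd]
    rcases Nat.even_or_odd j with ⟨m, hm⟩ | ⟨m, hm⟩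
    · have hj2 : j = 2 * m := by omega
      rw [hj2, show 2 * m / 2 = m by omega, show 2 * m % 2 = 0 by omega,
        (pvState_closed m).1]
      simp
    · rw [hm, show (2 * m + 1) / 2 = m by omega, show (2 * m + 1) % 2 = 1 by omega,
        (pvState_closed m).2]
      norm_num
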